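-- pv_equiv track=rewrite | github.com/daylayown/tucson-daily-brief-site | public_record_liquor.py | find_liquor_blocks
-- ===== SOURCE A (Python) =====
-- def find_liquor_blocks(full_md_text: str) -> list[str]:
--     """Find text windows around 'liquor license' mentions in a full agenda reference.
--
--     Strategy:
--     1. Find every line containing "liquor license" (case-insensitive), skipping
--        lines that are clearly about one-off special event permits.
--     2. Cluster nearby hits — hits within 35 lines of each other are part of the
--        same agenda section and become one block.
--     3. For each cluster, take a generous window: 5 lines before the first hit
--        to 35 lines after the last hit. Tucson is verbose (section header may be
--        ~20 lines above the actual data fields), so a wide tail is essential.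
--
--     Each block may contain multiple distinct filings (Pima often has 2-3
--     consecutive items). Claude handles splitting them in extract_liquor_filings.
--     """
--     lines = full_md_text.split("\n")
--     n = len(lines)
--
--     hits = []
--     for i, line in enumerate(lines):
--         lower = line.lower()
--         if "liquor license" not in lower:
--             continue
--         # Skip one-off special event permits (Pima format: "Special Event Liquor License")
--         if "special event" in lower:
--             continue
--         hits.append(i)
--
--     if not hits:
--         return []
--
--     # Cluster hits into groups where consecutive hits are within 35 lines
--     clusters = [[hits[0]]]
--     for h in hits[1:]:
--         if h - clusters[-1][-1] <= 35:
--             clusters[-1].append(h)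
--         else:
--             clusters.append([h])
--
--     blocks = []
--     for cluster in clusters:
--         start = max(0, cluster[0] - 5)
--         end = min(n, cluster[-1] + 35)
--         block = "\n".join(lines[start:end]).strip()
--         blocks.append(block)
--
--     return blocks
-- ===== SOURCE B (Python) =====
-- def find_liquor_blocks(full_md_text: str) -> list[str]:
--     """One pass over the lines: maintain the open cluster as (first_hit, prev_hit),
--     flushing it into a block whenever a new qualifying line is more than 35 lines
--     past the previous hit, and once more at the end."""
--     lines = full_md_text.split("\n")
--     n = len(lines)
--
--     blocks = []
--     first_hit = None
--     prev_hit = None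
--     for i, line in enumerate(lines):
--         lower = line.lower()
--         if "liquor license" in lower and "special event" not in lower:
--             if first_hit is None:
--                 first_hit = i
--                 prev_hit = i
--             elif i - prev_hit <= 35:
--                 prev_hit = i
--             else:
--                 blocks.append("\n".join(lines[max(0, first_hit - 5):min(n, prev_hit + 35)]).strip())
--                 first_hit = i
--                 prev_hit = i
--     if first_hit is not None:
--         blocks.append("\n".join(lines[max(0, first_hit - 5):min(n, prev_hit + 35)]).strip())
--     return blocks
-- ===== Notes on version B (the rewrite author's own statement) =====
-- stated objective: simpler
-- what changed: Replaces the three sequential phases (collect hit indices, cluster them into lists of lists, then map clusters to blocks) with a single pass over the enumerated lines that keeps only a first_hit/prev_hit pair for the open cluster and flushes blocks on the fly.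
import Mathlib
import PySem

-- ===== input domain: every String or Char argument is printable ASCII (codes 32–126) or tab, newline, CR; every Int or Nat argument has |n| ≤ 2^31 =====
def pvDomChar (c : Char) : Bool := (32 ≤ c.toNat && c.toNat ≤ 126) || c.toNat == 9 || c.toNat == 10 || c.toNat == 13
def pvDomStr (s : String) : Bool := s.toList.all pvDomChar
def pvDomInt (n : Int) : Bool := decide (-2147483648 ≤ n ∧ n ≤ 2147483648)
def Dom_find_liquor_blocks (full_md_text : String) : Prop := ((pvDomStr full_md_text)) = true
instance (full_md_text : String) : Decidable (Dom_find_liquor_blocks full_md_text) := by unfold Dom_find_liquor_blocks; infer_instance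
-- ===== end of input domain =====

-- B replaces A's three phases (hit list, cluster list-of-lists, block map) by one pass
-- keeping only the open cluster's (first_hit, prev_hit); objective: simpler.

-- ===== PORT A =====
-- cluster[0] / cluster[-1] and clusters[-1] are ported with .head?/.getLast? plus a .getD
-- default that is never reached (Python's clusters and their members are never empty);
-- s.split("\n") is Str.split? with its never-none result unwrapped (the separator is nonempty).
def find_liquor_blocks (full_md_text : String) : List String :=
  let lines := (PySem.Str.split? full_md_text "\n").getD []
  let n := lines.length
  let hits : List Int := (PySem.List.enumerate lines 0).foldl (fun hits p =>
    let lower := PySem.Str.lower p.2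
    if !PySem.Str.isIn "liquor license" lower then hits
    else if PySem.Str.isIn "special event" lower then hits
    else hits ++ [p.1]) []
  match hits with
  | [] => []
  | h0 :: rest =>
    let clusters : List (List Int) := rest.foldl (fun clusters h =>
      if h - ((clusters.getLast?.getD []).getLast?.getD 0) ≤ 35 then
        clusters.dropLast ++ [(clusters.getLast?.getD []) ++ [h]]
      else clusters ++ [[h]]) [[h0]]
    clusters.foldl (fun blocks cluster =>
      let start := max 0 (cluster.head?.getD 0 - 5)
      let stop := min (n : Int) (cluster.getLast?.getD 0 + 35)
      blocks ++ [PySem.Str.strip (PySem.Str.join "\n" (PySem.List.slice lines (some start) (some stop)))]) []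

-- ===== PORT B =====
def find_liquor_blocks_alt (full_md_text : String) : List String :=
  let lines := (PySem.Str.split? full_md_text "\n").getD []
  let n := lines.length
  let st := (PySem.List.enumerate lines 0).foldl
    (fun (st : List String × Option (Int × Int)) p =>
      let lower := PySem.Str.lower p.2
      if PySem.Str.isIn "liquor license" lower && !PySem.Str.isIn "special event" lower then
        match st.2 with
        | none => (st.1, some (p.1, p.1))
        | some (first_hit, prev_hit) =>
          if p.1 - prev_hit ≤ 35 then (st.1, some (first_hit, p.1))
          else (st.1 ++ [PySem.Str.strip (PySem.Str.join "\n"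
                  (PySem.List.slice lines (some (max 0 (first_hit - 5))) (some (min (n : Int) (prev_hit + 35)))))],
                some (p.1, p.1))
      else st) ([], none)
  match st.2 with
  | none => st.1
  | some (first_hit, prev_hit) =>
    st.1 ++ [PySem.Str.strip (PySem.Str.join "\n"
      (PySem.List.slice lines (some (max 0 (first_hit - 5))) (some (min (n : Int) (prev_hit + 35)))))]

-- ===== PRECONDITION & SPEC =====
def Spec_find_liquor_blocks (full_md_text : String) (out : List String) : Prop := out = find_liquor_blocks_alt full_md_text
instance (full_md_text : String) (out : List String) : Decidable (Spec_find_liquor_blocks full_md_text out) := by unfold Spec_find_liquor_blocks; infer_instance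

-- ===== CLAIM (what is proved, stated in full; the proofs are below) =====
def Claim_equal_find_liquor_blocks : Prop := ∀ (full_md_text : String), Dom_find_liquor_blocks full_md_text → Spec_find_liquor_blocks full_md_text (find_liquor_blocks full_md_text)

-- ===== LEMMAS AND PROOFS =====

/-- the hit condition both programs test -/
def pvQual (line : String) : Bool :=
  PySem.Str.isIn "liquor license" (PySem.Str.lower line) &&
  !PySem.Str.isIn "special event" (PySem.Str.lower line)

/-- the block window both programs cut out -/
def pvBlock (lines : List String) (f p : Int) : String :=
  PySem.Str.strip (PySem.Str.join "\n"
    (PySem.List.slice lines (some (max 0 (f - 5))) (some (min (lines.length : Int) (p + 35)))))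

/-- A's clustering step -/
def pvAstep (clusters : List (List Int)) (h : Int) : List (List Int) :=
  if h - ((clusters.getLast?.getD []).getLast?.getD 0) ≤ 35 then
    clusters.dropLast ++ [(clusters.getLast?.getD []) ++ [h]]
  else clusters ++ [[h]]

/-- B's step on a hit index -/
def pvGstep (lines : List String) (st : List String × Option (Int × Int)) (h : Int) :
    List String × Option (Int × Int) :=
  match st.2 with
  | none => (st.1, some (h, h))
  | some (f, p) =>
    if h - p ≤ 35 then (st.1, some (f, h))
    else (st.1 ++ [pvBlock lines f p], some (h, h))

/-- B's final flush -/
def pvFinish (lines : List String) (st : List String × Option (Int × Int)) : List String :=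
  match st.2 with
  | none => st.1
  | some (f, p) => st.1 ++ [pvBlock lines f p]

/-- a fold that ignores the non-qualifying elements is a fold over the filtered list -/
theorem pv_foldl_filterMap {α β σ : Type} (q : β → Bool) (h : β → α) (g : σ → α → σ)
    (l : List β) (s : σ) :
    l.foldl (fun s x => if q x then g s (h x) else s) s
      = (l.filterMap fun x => if q x then some (h x) else none).foldl g s := by
  induction l generalizing s with
  | nil => rfl
  | cons x xs ih => by_cases hx : q x <;> simp [hx, ih]

theorem pv_foldl_app (l : List Int) (acc : List Int) :
    l.foldl (fun a i => a ++ [i]) acc = acc ++ l := by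
  induction l generalizing acc with
  | nil => simp
  | cons x xs ih => simp [ih]

/-- A's hit loop collects exactly the qualifying indices -/
theorem pv_a_hits (l : List (Int × String)) (acc : List Int) :
    l.foldl (fun hits p =>
      let lower := PySem.Str.lower p.2
      if !PySem.Str.isIn "liquor license" lower then hits
      else if PySem.Str.isIn "special event" lower then hits
      else hits ++ [p.1]) acc
    = acc ++ l.filterMap fun p => if pvQual p.2 then some p.1 else none := by
  rw [← pv_foldl_app (l.filterMap fun p => if pvQual p.2 then some p.1 else none) acc,
    ← pv_foldl_filterMap (fun p => pvQual p.2) (fun p : Int × String => p.1)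
      (fun a i => a ++ [i]) l acc]
  congr 1
  funext a p
  by_cases h1 : PySem.Str.isIn "liquor license" (PySem.Str.lower p.2) <;>
    by_cases h2 : PySem.Str.isIn "special event" (PySem.Str.lower p.2) <;>
    simp only [pvQual] <;> simp only [h1, h2] <;> simp

/-- B's loop is the pvGstep fold over the qualifying indices -/
theorem pv_b_hits (lines : List String) (l : List (Int × String))
    (st : List String × Option (Int × Int)) :
    l.foldl (fun (st : List String × Option (Int × Int)) p =>
      let lower := PySem.Str.lower p.2
      if PySem.Str.isIn "liquor license" lower && !PySem.Str.isIn "special event" lower then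
        match st.2 with
        | none => (st.1, some (p.1, p.1))
        | some (first_hit, prev_hit) =>
          if p.1 - prev_hit ≤ 35 then (st.1, some (first_hit, p.1))
          else (st.1 ++ [PySem.Str.strip (PySem.Str.join "\n"
                  (PySem.List.slice lines (some (max 0 (first_hit - 5))) (some (min (lines.length : Int) (prev_hit + 35)))))],
                some (p.1, p.1))
      else st) st
    = (l.filterMap fun p => if pvQual p.2 then some p.1 else none).foldl (pvGstep lines) st := by
  rw [← pv_foldl_filterMap (fun p => pvQual p.2) (fun p : Int × String => p.1)
      (pvGstep lines) l st]
  rfl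

/-- A's block loop is a map over the clusters -/
theorem pv_blocks_map (lines : List String) (cs : List (List Int)) (acc : List String) :
    cs.foldl (fun blocks cluster =>
      let start := max 0 (cluster.head?.getD 0 - 5)
      let stop := min (lines.length : Int) (cluster.getLast?.getD 0 + 35)
      blocks ++ [PySem.Str.strip (PySem.Str.join "\n" (PySem.List.slice lines (some start) (some stop)))]) acc
    = acc ++ cs.map (fun c => pvBlock lines (c.head?.getD 0) (c.getLast?.getD 0)) := by
  induction cs generalizing acc with
  | nil => simp
  | cons c cs ih => simp [ih, pvBlock]

/-- main invariant: B's fold with an open cluster (f, p) matches A's clustering fold -/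
theorem pv_main (lines : List String) (l : List Int) (cs : List (List Int)) (c : List Int)
    (f p : Int) (hf : c.head? = some f) (hp : c.getLast? = some p) :
    pvFinish lines (l.foldl (pvGstep lines)
        (cs.map (fun c => pvBlock lines (c.head?.getD 0) (c.getLast?.getD 0)), some (f, p)))
    = (l.foldl pvAstep (cs ++ [c])).map
        (fun c => pvBlock lines (c.head?.getD 0) (c.getLast?.getD 0)) := by
  induction l generalizing cs c f p with
  | nil =>
    simp [pvFinish, hf, hp]
  | cons h l ih =>
    have hlast : (cs ++ [c]).getLast?.getD [] = c := by simp
    simp only [List.foldl_cons, pvGstep, pvAstep, hlast, hp, Option.getD_some, List.dropLast_concat]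
    by_cases hle : h - p ≤ 35
    · simp only [if_pos hle]
      have h1 : (c ++ [h]).head? = some f := by
        cases c with | nil => simp at hf | cons a t => simpa using hf
      have h2 : (c ++ [h]).getLast? = some h := by simp
      have := ih cs (c ++ [h]) f h h1 h2
      simpa using this
    · simp only [if_neg hle]
      have := ih (cs ++ [c]) [h] h h rfl rfl
      simp only [List.map_append, List.map_cons, List.map_nil, hf, hp, Option.getD_some] at this ⊢
      exact this

theorem pv_eq (full_md_text : String) :
    find_liquor_blocks full_md_text = find_liquor_blocks_alt full_md_text := by
  unfold find_liquor_blocks find_liquor_blocks_alt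
  set lines := (PySem.Str.split? full_md_text "\n").getD [] with hl
  simp only [pv_a_hits, pv_b_hits, List.nil_append]
  cases hh : (PySem.List.enumerate lines 0).filterMap
      (fun p => if pvQual p.2 then some p.1 else none) with
  | nil => rfl
  | cons h0 rest =>
    change List.foldl _ [] (List.foldl _ [[h0]] rest) = _
    rw [pv_blocks_map, List.nil_append]
    have := pv_main lines rest [] [h0] h0 h0 rfl rfl
    simp only [List.map_nil, List.nil_append, List.foldl_cons] at this ⊢
    exact this.symm

-- ===== VERDICT (by name: the statement is the Claim_ definition above) =====
theorem find_liquor_blocks_spec : Claim_equal_find_liquor_blocks := by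
  intro s _
  unfold Spec_find_liquor_blocks
  exact pv_eq s
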